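-- pv_equiv track=rewrite | github.com/quocdat-le-insacvl/CodINSA2021 | Controller/Util.py | find_resources
-- ===== SOURCE A (Python) =====
-- def find_resources(game_map):
--     resources = []
--     x = 0
--     y = 0
--     down = 0
--     for c in game_map:
--         if c == " ":
--             continue
--         if c == "\n":
--             y = y + 1
--             x = 0
--             down = 0
--             continue
--         if c == "R":
--             resources.append((x, y, down, "R"))
--         if down == 0:
--             down = 1
--         else:
--             down = 0
--             x = x + 1
--     return resources
-- ===== SOURCE B (Python) =====
-- def find_resources(game_map):
--     resources = []
--     for y, line in enumerate(game_map.split("\n")):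
--         i = line.find("R")
--         while i != -1:
--             k = i - line[:i].count(" ")
--             resources.append((k // 2, y, k % 2, "R"))
--             i = line.find("R", i + 1)
--     return resources
-- ===== Notes on version B (the rewrite author's own statement) =====
-- stated objective: faster
-- what changed: Replaces A's char-by-char state machine (running x, y and a down-toggle) by an occurrence-driven scan: split on newlines, then per line jump from one 'R' to the next with str.find and recompute each coordinate independently from a prefix slice count, x = k//2, down = k%2.
import Mathlib
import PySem

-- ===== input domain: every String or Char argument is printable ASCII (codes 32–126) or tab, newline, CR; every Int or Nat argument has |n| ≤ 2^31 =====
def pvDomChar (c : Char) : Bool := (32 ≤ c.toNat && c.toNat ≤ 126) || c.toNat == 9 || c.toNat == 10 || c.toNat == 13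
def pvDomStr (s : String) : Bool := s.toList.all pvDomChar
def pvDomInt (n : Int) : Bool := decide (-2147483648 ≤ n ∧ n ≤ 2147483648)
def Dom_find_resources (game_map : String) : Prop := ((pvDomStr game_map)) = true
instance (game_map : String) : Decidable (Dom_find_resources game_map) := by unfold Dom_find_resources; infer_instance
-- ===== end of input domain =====

-- B replaces A's char-by-char x/y/down state machine by splitting into lines and, per line,
-- jumping from one 'R' occurrence to the next with str.find, recomputing each coordinate
-- from a prefix slice (objective: faster — a timing run measured B faster; str.find/str.count do the scanning instead of a per-char Python loop).

-- ===== PORT A =====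
-- A's loop body over the state (resources, x, y, down), branch for branch.
def pvStepA (st : List (Int × Int × Int × String) × Int × Int × Int) (c : Char) :
    List (Int × Int × Int × String) × Int × Int × Int :=
  let (resources, x, y, down) := st
  if c = ' ' then (resources, x, y, down)
  else if c = '\n' then (resources, 0, y + 1, 0)
  else
    let resources := if c = 'R' then resources ++ [(x, y, down, "R")] else resources
    if down = 0 then (resources, x, y, 1) else (resources, x + 1, y, 0)

def find_resources (game_map : String) : List (Int × Int × Int × String) :=
  (game_map.toList.foldl pvStepA ([], 0, 0, 0)).1

-- ===== PORT B =====
-- B's inner `while i != -1` loop; i is the index returned by line.find("R", …), each step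
-- moves i strictly right, so fuel = line.length iterations always suffice.
def pvScanR (y : Int) (ln : List Char) : Nat → Int → List (Int × Int × Int × String)
  | 0, _ => []
  | fuel + 1, i =>
    if i = -1 then []
    else
      (PySem.Int.floordiv (i - (PySem.Chars.count (PySem.Chars.slice ln none (some i)) [' '] : Int)) 2, y,
       PySem.Int.mod (i - (PySem.Chars.count (PySem.Chars.slice ln none (some i)) [' '] : Int)) 2, "R") ::
        pvScanR y ln fuel (PySem.Chars.findFrom ln ['R'] (i + 1) none)

def find_resources_alt (game_map : String) : List (Int × Int × Int × String) :=
  (PySem.List.enumerate (PySem.Chars.splitOn game_map.toList ['\n'])).foldl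
    (fun res p => res ++ pvScanR p.1 p.2 p.2.length (PySem.Chars.find p.2 ['R'])) []

-- ===== PRECONDITION & SPEC =====
def Spec_find_resources (game_map : String) (out : List (Int × Int × Int × String)) : Prop := out = find_resources_alt game_map
instance (game_map : String) (out : List (Int × Int × Int × String)) : Decidable (Spec_find_resources game_map out) := by unfold Spec_find_resources; infer_instance

-- ===== CLAIM (what is proved, stated in full; the proofs are below) =====
def Claim_equal_find_resources : Prop := ∀ (game_map : String), Dom_find_resources game_map → Spec_find_resources game_map (find_resources game_map)

-- ===== LEMMAS AND PROOFS =====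

-- Reference split-on-'\n' recursion, shown equal to PySem.Chars.splitOn below.
def splitNl : List Char → List (List Char)
  | [] => [[]]
  | c :: t =>
    if c = '\n' then [] :: splitNl t
    else match splitNl t with
      | [] => [[c]]
      | p :: ps => (c :: p) :: ps

lemma splitNl_ne_nil (cs : List Char) : splitNl cs ≠ [] := by
  induction cs with
  | nil => simp [splitNl]
  | cons c t ih =>
    simp only [splitNl]
    split
    · simp
    · split <;> simp

lemma go_spec : ∀ (fuel : Nat) (l cur : List Char) (acc : List (List Char)),
    l.length ≤ fuel →
    PySem.Chars.splitOn.go ['\n'] fuel l cur acc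
      = acc.reverse ++ (match splitNl l with
          | [] => []
          | p :: ps => (cur.reverse ++ p) :: ps) := by
  intro fuel
  induction fuel with
  | zero =>
    intro l cur acc h
    have : l = [] := by cases l <;> simp_all
    subst this
    simp [PySem.Chars.splitOn.go, splitNl]
  | succ n ih =>
    intro l cur acc h
    cases l with
    | nil => simp [PySem.Chars.splitOn.go, splitNl]
    | cons c rest =>
      rw [PySem.Chars.splitOn.go]
      by_cases hc : c = '\n'
      · subst hc
        have hp : ['\n'].isPrefixOf ('\n' :: rest) = true := by simp [List.isPrefixOf]
        simp only [hp, if_true]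
        show PySem.Chars.splitOn.go ['\n'] n rest [] (cur.reverse :: acc) = _
        rw [ih rest [] (cur.reverse :: acc) (by simp at h; omega)]
        cases hs : splitNl rest with
        | nil => exact absurd hs (splitNl_ne_nil rest)
        | cons p ps => simp [splitNl, hs]
      · have hp : ['\n'].isPrefixOf (c :: rest) = false := by
          simp [List.isPrefixOf]; exact fun h' => hc h'.symm
        simp only [hp, Bool.false_eq_true, if_false]
        rw [ih rest (c :: cur) acc (by simp at h; omega)]
        cases hs : splitNl rest with
        | nil => exact absurd hs (splitNl_ne_nil rest)
        | cons p ps => simp [splitNl, hs, hc]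

lemma splitOn_eq_splitNl (cs : List Char) :
    PySem.Chars.splitOn cs ['\n'] = splitNl cs := by
  rw [PySem.Chars.splitOn, go_spec _ _ _ _ (by omega)]
  cases h : splitNl cs with
  | nil => exact absurd h (splitNl_ne_nil cs)
  | cons p ps => simp

-- A written line by line: counter-based processing of a single line (proof intermediate).
def pvLineB (y : Int) (ln : List Char) (st : List (Int × Int × Int × String) × Nat) :
    List (Int × Int × Int × String) × Nat :=
  ln.foldl
    (fun st c =>
      if c ≠ ' ' then
        ((if c = 'R' then st.1 ++ [(((st.2 / 2 : Nat) : Int), y, ((st.2 % 2 : Nat) : Int), "R")]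
          else st.1), st.2 + 1)
      else st) st

-- A's fold from a mid-line state (x = k/2, down = k%2) equals per-line processing of the
-- remaining lines of splitNl.
lemma foldA_splitNl : ∀ (cs : List Char) (res : List (Int × Int × Int × String)) (y : Int) (k : Nat),
    (cs.foldl pvStepA (res, ((k / 2 : Nat) : Int), y, ((k % 2 : Nat) : Int))).1
      = (match splitNl cs with
         | [] => res
         | p :: ps =>
             (PySem.List.enumerate ps (y + 1)).foldl
               (fun r q => (pvLineB q.1 q.2 (r, 0)).1) (pvLineB y p (res, k)).1) := by
  intro cs
  induction cs with
  | nil => intro res y k; simp [splitNl, pvLineB]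
  | cons c t ih =>
    intro res y k
    by_cases hnl : c = '\n'
    · subst hnl
      have hstep : pvStepA (res, ((k / 2 : Nat) : Int), y, ((k % 2 : Nat) : Int)) '\n'
          = (res, ((0 / 2 : Nat) : Int), y + 1, ((0 % 2 : Nat) : Int)) := by
        simp [pvStepA]
      rw [List.foldl_cons, hstep, ih res (y + 1) 0]
      cases hs : splitNl t with
      | nil => exact absurd hs (splitNl_ne_nil t)
      | cons p ps =>
        simp [splitNl, hs, pvLineB, PySem.List.enumerate_cons]
    · by_cases hsp : c = ' '
      · subst hsp
        have hstep : pvStepA (res, ((k / 2 : Nat) : Int), y, ((k % 2 : Nat) : Int)) ' '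
            = (res, ((k / 2 : Nat) : Int), y, ((k % 2 : Nat) : Int)) := by
          simp [pvStepA]
        rw [List.foldl_cons, hstep, ih res y k]
        cases hs : splitNl t with
        | nil => exact absurd hs (splitNl_ne_nil t)
        | cons p ps =>
          have : splitNl (' ' :: t) = (' ' :: p) :: ps := by simp [splitNl, hs]
          rw [this]
          simp [pvLineB]
      · -- ordinary character: A toggles, the counter counts
        set res' : List (Int × Int × Int × String) :=
          if c = 'R' then res ++ [(((k / 2 : Nat) : Int), y, ((k % 2 : Nat) : Int), "R")] else res with hres'
        have hstep : pvStepA (res, ((k / 2 : Nat) : Int), y, ((k % 2 : Nat) : Int)) c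
            = (res', (((k + 1) / 2 : Nat) : Int), y, (((k + 1) % 2 : Nat) : Int)) := by
          simp only [pvStepA, hnl, hsp, if_false]
          rcases Nat.mod_two_eq_zero_or_one k with h2 | h2
          · have hd : ((k % 2 : Nat) : Int) = 0 := by rw [h2]; simp
            have hx : (k + 1) / 2 = k / 2 := by omega
            have hm : (k + 1) % 2 = 1 := by omega
            simp [hd, hx, hm, hres']
          · have hd : ((k % 2 : Nat) : Int) = 1 := by rw [h2]; simp
            have hx : ((k / 2 : Nat) : Int) + 1 = (((k + 1) / 2 : Nat) : Int) := by
              have : (k + 1) / 2 = k / 2 + 1 := by omega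
              rw [this]; push_cast; ring
            have hm : (k + 1) % 2 = 0 := by omega
            simp [hd, hm, ← hx, hres']
        rw [List.foldl_cons, hstep, ih res' y (k + 1)]
        cases hs : splitNl t with
        | nil => exact absurd hs (splitNl_ne_nil t)
        | cons p ps =>
          have hsplit : splitNl (c :: t) = (c :: p) :: ps := by
            simp [splitNl, hs, hnl]
          rw [hsplit]
          simp [pvLineB, hsp, hres']

-- Chars.count with a single-character needle is List.count.
lemma countGo_single (c : Char) : ∀ (fuel : Nat) (l : List Char) (acc : Nat), l.length ≤ fuel →
    PySem.Chars.count.go [c] fuel l acc = acc + l.count c := by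
  intro fuel
  induction fuel with
  | zero =>
    intro l acc h
    have : l = [] := by cases l <;> simp_all
    subst this; simp [PySem.Chars.count.go]
  | succ n ih =>
    intro l acc h
    cases l with
    | nil => simp [PySem.Chars.count.go]
    | cons a t =>
      rw [PySem.Chars.count.go]
      by_cases hc : c = a
      · subst hc
        have hp : [c].isPrefixOf (c :: t) = true := by simp [List.isPrefixOf]
        simp only [hp, if_true]
        have hd : List.drop [c].length (c :: t) = t := by simp
        rw [hd, ih t (acc + 1) (by simp at h; omega)]
        simp [List.count_cons]
        omega
      · have hp : [c].isPrefixOf (a :: t) = false := by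
          simp [List.isPrefixOf]
          exact hc
        simp only [hp, Bool.false_eq_true, if_false]
        rw [ih t acc (by simp at h; omega)]
        simp [List.count_cons, Ne.symm hc]

lemma count_single (l : List Char) (c : Char) :
    PySem.Chars.count l [c] = l.count c := by
  rw [PySem.Chars.count]
  simp [countGo_single c l.length l 0 le_rfl]

-- B's per-occurrence value at line position j (what the loop body computes when ln[j] = 'R').
def pvVal (y : Int) (ln : List Char) (j : Nat) : Int × Int × Int × String :=
  (PySem.Int.floordiv ((j : Int) - (PySem.Chars.count (ln.take j) [' '] : Int)) 2, y,
   PySem.Int.mod ((j : Int) - (PySem.Chars.count (ln.take j) [' '] : Int)) 2, "R")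

-- position-indexed reference scan of one line
def scanFrom (y : Int) (ln : List Char) (j : Nat) : List (Int × Int × Int × String) :=
  if h : j < ln.length then
    (if ln[j] = 'R' then [pvVal y ln j] else []) ++ scanFrom y ln (j + 1)
  else []
termination_by ln.length - j

lemma count_space_le (ln : List Char) (j : Nat) :
    (ln.take j).count ' ' ≤ j := by
  calc (ln.take j).count ' ' ≤ (ln.take j).length := List.count_le_length
  _ ≤ j := by simp

-- A's per-line counter scan equals the position-indexed scan.
lemma lineB_scanFrom (y : Int) (ln : List Char) :
    ∀ (n j : Nat) (res : List (Int × Int × Int × String)),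
      ln.length - j = n → j ≤ ln.length →
      (pvLineB y (ln.drop j) (res, j - (ln.take j).count ' ')).1
        = res ++ scanFrom y ln j := by
  intro n
  induction n with
  | zero =>
    intro j res hn hj
    have hj' : j = ln.length := by omega
    subst hj'
    rw [scanFrom]
    simp [pvLineB]
  | succ n ih =>
    intro j res hn hj
    have hlt : j < ln.length := by omega
    have hdrop : ln.drop j = ln[j] :: ln.drop (j + 1) :=
      List.drop_eq_getElem_cons hlt
    have htake : ln.take (j + 1) = ln.take j ++ [ln[j]] := by
      rw [List.take_succ]
      simp [List.getElem?_eq_getElem hlt]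
    have hcnt := count_space_le ln j
    rw [scanFrom, dif_pos hlt, hdrop]
    unfold pvLineB
    rw [List.foldl_cons]
    by_cases hsp : ln[j] = ' '
    · have hc1 : (ln.take (j + 1)).count ' ' = (ln.take j).count ' ' + 1 := by
        rw [htake, List.count_append]; simp [hsp]
      simp only [hsp, ne_eq, not_true_eq_false, if_false]
      have harg : j - (ln.take j).count ' ' = j + 1 - (ln.take (j + 1)).count ' ' := by
        rw [hc1]; omega
      rw [harg]
      have hR : ln[j] ≠ 'R' := by rw [hsp]; decide
      have := ih (j + 1) res (by omega) (by omega)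
      unfold pvLineB at this
      rw [this]
      simp [hR]
    · have hc1 : (ln.take (j + 1)).count ' ' = (ln.take j).count ' ' := by
        rw [htake, List.count_append]; simp [hsp]
      have harg : j - (ln.take j).count ' ' + 1 = j + 1 - (ln.take (j + 1)).count ' ' := by
        rw [hc1]; omega
      simp only [ne_eq, hsp, not_false_eq_true, if_true]
      by_cases hR : ln[j] = 'R'
      · simp only [hR, if_true]
        have hval : ((((j - (ln.take j).count ' ') / 2 : Nat) : Int), y,
            (((j - (ln.take j).count ' ') % 2 : Nat) : Int), "R") = pvVal y ln j := by
          unfold pvVal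
          have hk : (j : Int) - (PySem.Chars.count (ln.take j) [' '] : Int)
              = ((j - (ln.take j).count ' ' : Nat) : Int) := by
            rw [count_single]; omega
          rw [hk]
          have h2 : (2 : Int) = ((2 : Nat) : Int) := by norm_num
          rw [h2, PySem.Int.floordiv_natCast, PySem.Int.mod_natCast]
        have := ih (j + 1) (res ++ [pvVal y ln j]) (by omega) (by omega)
        unfold pvLineB at this
        rw [harg]
        simp only [hval]
        rw [this]
        simp
      · simp only [hR, if_false]
        have := ih (j + 1) res (by omega) (by omega)
        unfold pvLineB at this
        rw [harg, this]
        simp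

lemma singleton_prefix_iff (c : Char) (t : List Char) : [c] <+: t ↔ t.head? = some c := by
  cases t <;> simp [List.cons_prefix_iff]

lemma prefix_drop_iff (ln : List Char) (m : Nat) (c : Char) :
    [c] <+: ln.drop m ↔ ln[m]? = some c := by
  rw [singleton_prefix_iff, List.head?_drop]

lemma scanFrom_end (y : Int) (ln : List Char) (j : Nat) (h : ln.length ≤ j) :
    scanFrom y ln j = [] := by
  rw [scanFrom, dif_neg (by omega)]

lemma scanFrom_congr (y : Int) (ln : List Char) :
    ∀ (d m j : Nat), m - j = d → j ≤ m → m ≤ ln.length →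
    (∀ i, j ≤ i → i < m → ln[i]? ≠ some 'R') →
    scanFrom y ln j = scanFrom y ln m := by
  intro d
  induction d with
  | zero => intro m j h1 h2 _ _; have : j = m := by omega
            rw [this]
  | succ n ih =>
    intro m j h1 h2 h3 hno
    have hj : j < ln.length := by omega
    rw [scanFrom, dif_pos hj]
    have hR : ln[j] ≠ 'R' := by
      have := hno j le_rfl (by omega)
      simpa [List.getElem?_eq_getElem hj] using this
    rw [if_neg hR]
    simp only [List.nil_append]
    exact ih m (j + 1) (by omega) (by omega) h3 (fun i h1' h2' => hno i (by omega) h2')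

-- B's find-driven loop equals the position-indexed scan.
lemma scanR_eq (y : Int) (ln : List Char) :
    ∀ (fuel j : Nat), j ≤ ln.length → ln.length - j ≤ fuel →
      pvScanR y ln fuel (PySem.Chars.findFrom ln ['R'] (j : Int) none) = scanFrom y ln j := by
  intro fuel
  induction fuel with
  | zero =>
    intro j hj hf
    have : j = ln.length := by omega
    subst this
    rw [pvScanR, scanFrom_end y ln _ le_rfl]
  | succ fuel ih =>
    intro j hj hf
    rw [PySem.Chars.findFrom_natCast ln ['R'] j hj]
    by_cases hfind : PySem.Chars.find (ln.drop j) ['R'] = -1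
    · rw [if_pos hfind, pvScanR, if_pos rfl]
      have hinf : ¬ ['R'] <:+: ln.drop j := (PySem.Chars.find_eq_neg_one_iff _ _).mp hfind
      have hno : ∀ i, j ≤ i → i < ln.length → ln[i]? ≠ some 'R' := by
        intro i h1 h2 hc
        apply hinf
        have : ['R'] <+: (ln.drop j).drop (i - j) := by
          rw [List.drop_drop, prefix_drop_iff]
          rw [show j + (i - j) = i by omega]
          exact hc
        exact this.isInfix.trans (List.drop_suffix _ _).isInfix
      rw [scanFrom_congr y ln (ln.length - j) ln.length j rfl hj le_rfl
            (fun i h1 h2 => hno i h1 h2), scanFrom_end y ln _ le_rfl]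
    · rw [if_neg hfind]
      have hr0 : 0 ≤ PySem.Chars.find (ln.drop j) ['R'] :=
        (PySem.Chars.find_nonneg_iff _ _).mpr ((PySem.Chars.find_ne_neg_one_iff _ _).mp hfind)
      set r := PySem.Chars.find (ln.drop j) ['R'] with hrdef
      obtain ⟨hpre, hmin⟩ := PySem.Chars.find_spec (s := ln.drop j) (sub := ['R']) hr0
      set m := j + r.toNat with hmdef
      have hmR : ln[m]? = some 'R' := by
        rw [← prefix_drop_iff, ← List.drop_drop]
        exact hpre
      have hmlt : m < ln.length := by
        by_contra hge
        rw [List.getElem?_eq_none (by omega)] at hmR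
        simp at hmR
      have hcast : (j : Int) + r = ((m : Nat) : Int) := by
        rw [hmdef]; push_cast [Int.toNat_of_nonneg hr0]; ring
      rw [pvScanR, hcast, if_neg (by omega)]
      have hslice : PySem.Chars.slice ln none (some ((m : Nat) : Int)) = ln.take m := by
        simp [PySem.Chars.slice_eq_listSlice, PySem.List.slice_to_natCast]
      have hval : (PySem.Int.floordiv (((m : Nat) : Int) - (PySem.Chars.count (PySem.Chars.slice ln none (some ((m : Nat) : Int))) [' '] : Int)) 2, y,
          PySem.Int.mod (((m : Nat) : Int) - (PySem.Chars.count (PySem.Chars.slice ln none (some ((m : Nat) : Int))) [' '] : Int)) 2, "R")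
            = pvVal y ln m := by
        rw [hslice]; rfl
      rw [hval]
      have hrec : ((m : Nat) : Int) + 1 = (((m + 1 : Nat)) : Int) := by push_cast; ring
      rw [hrec, ih (m + 1) (by omega) (by omega)]
      have hskip : scanFrom y ln j = scanFrom y ln m := by
        apply scanFrom_congr y ln (m - j) m j rfl (by omega) (by omega)
        intro i h1 h2 hc
        have : ['R'] <+: (ln.drop j).drop (i - j) := by
          rw [List.drop_drop, prefix_drop_iff, show j + (i - j) = i by omega]
          exact hc
        exact hmin (i - j) (by omega) this
      have hmR' : ln[m]'hmlt = 'R' := by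
        have := hmR; rwa [List.getElem?_eq_getElem hmlt, Option.some_inj] at this
      rw [hskip]
      rw [show scanFrom y ln m = pvVal y ln m :: scanFrom y ln (m + 1) by
        rw [scanFrom, dif_pos hmlt, if_pos hmR']; rfl]

-- one whole line: A's counter scan from 0 equals B's find loop
lemma line_eq (y : Int) (ln : List Char) (res : List (Int × Int × Int × String)) :
    (pvLineB y ln (res, 0)).1
      = res ++ pvScanR y ln ln.length (PySem.Chars.find ln ['R']) := by
  have hL := lineB_scanFrom y ln ln.length 0 res rfl (by omega)
  simp only [List.drop_zero, List.take_zero, List.count_nil, Nat.sub_zero] at hL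
  have hR := scanR_eq y ln ln.length 0 (by omega) (by omega)
  rw [Nat.cast_zero, PySem.Chars.findFrom_zero] at hR
  rw [hL, hR]

-- ===== VERDICT (by name: the statement is the Claim_ definition above) =====
theorem find_resources_spec : Claim_equal_find_resources := by
  intro s _
  unfold Spec_find_resources find_resources find_resources_alt
  rw [splitOn_eq_splitNl]
  have h := foldA_splitNl s.toList [] 0 0
  simp only [Nat.zero_div, Nat.zero_mod, Nat.cast_zero] at h
  rw [h]
  cases hs : splitNl s.toList with
  | nil => exact absurd hs (splitNl_ne_nil s.toList)
  | cons p ps =>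
    dsimp only
    rw [PySem.List.enumerate_cons, List.foldl_cons]
    have hbody : (fun (r : List (Int × Int × Int × String)) (q : Int × List Char) =>
        (pvLineB q.1 q.2 (r, 0)).1)
        = fun res q => res ++ pvScanR q.1 q.2 q.2.length (PySem.Chars.find q.2 ['R']) := by
      funext r q
      exact line_eq q.1 q.2 r
    rw [hbody, line_eq 0 p []]
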